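-- pv_equiv track=rewrite | github.com/FrancoARossi/SySdL-TPs | pruebas.py | a_re4
-- ===== SOURCE A (Python) =====
-- def a_re4 (word):
-- 	s = 0
-- 	for c in word:
-- 		if s == 0 and c == 'e':
-- 			s = 1
-- 		elif s == 1 and c == 'l':
-- 			s = 2
-- 		elif s == 2 and c == 's':
-- 			s = 3
-- 		elif s == 3 and c == 'e':
-- 			s = 4
-- 		else:
-- 			s = -1
-- 			break
-- 	return (s == 4)
-- ===== SOURCE B (Python) =====
-- def a_re4(word):
--     return list(word) == ['e', 'l', 's', 'e']
-- ===== Notes on version B (the rewrite author's own statement) =====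
-- stated objective: simpler
-- what changed: Replaces the hand-rolled four-state automaton loop with a single build-and-compare of the input's characters against the target sequence ['e','l','s','e'].
import Mathlib
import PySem

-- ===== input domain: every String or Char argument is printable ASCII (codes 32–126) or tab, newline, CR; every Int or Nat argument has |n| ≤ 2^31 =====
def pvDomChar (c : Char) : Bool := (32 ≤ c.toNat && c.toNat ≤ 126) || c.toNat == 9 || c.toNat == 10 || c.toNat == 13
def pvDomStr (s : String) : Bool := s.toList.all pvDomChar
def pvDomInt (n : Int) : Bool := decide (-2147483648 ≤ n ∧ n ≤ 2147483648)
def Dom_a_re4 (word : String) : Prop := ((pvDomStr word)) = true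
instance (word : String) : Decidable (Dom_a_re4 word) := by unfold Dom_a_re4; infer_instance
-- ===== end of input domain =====

-- B replaces A's four-state automaton loop with one comparison of the character list against ['e','l','s','e'] (objective: simpler).

-- ===== PORT A =====
-- the for-loop with break, state s : Int; 'break' is modelled by returning -1 immediately
def a_re4_loop (s : Int) (cs : List Char) : Int :=
  match cs with
  | [] => s
  | c :: rest =>
    if s = 0 ∧ c = 'e' then a_re4_loop 1 rest
    else if s = 1 ∧ c = 'l' then a_re4_loop 2 rest
    else if s = 2 ∧ c = 's' then a_re4_loop 3 rest
    else if s = 3 ∧ c = 'e' then a_re4_loop 4 rest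
    else (-1)

def a_re4 (word : String) : Bool := a_re4_loop 0 word.toList == 4

-- ===== PORT B =====
def a_re4_alt (word : String) : Bool := word.toList == ['e', 'l', 's', 'e']

-- ===== PRECONDITION & SPEC =====
def Spec_a_re4 (word : String) (out : Bool) : Prop := out = a_re4_alt word
instance (word : String) (out : Bool) : Decidable (Spec_a_re4 word out) := by unfold Spec_a_re4; infer_instance

-- ===== CLAIM (what is proved, stated in full; the proofs are below) =====
def Claim_equal_a_re4 : Prop := ∀ (word : String), Dom_a_re4 word → Spec_a_re4 word (a_re4 word)

-- ===== LEMMAS AND PROOFS =====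

theorem loop4 (cs : List Char) : (a_re4_loop 4 cs = 4) ↔ cs = [] := by
  cases cs with
  | nil => simp [a_re4_loop]
  | cons c rest => simp [a_re4_loop]

theorem loop3 (cs : List Char) : (a_re4_loop 3 cs = 4) ↔ cs = ['e'] := by
  cases cs with
  | nil => simp [a_re4_loop]
  | cons c rest =>
    simp only [a_re4_loop]
    by_cases h : c = 'e'
    · simp [h, loop4]
    · simp [h]

theorem loop2 (cs : List Char) : (a_re4_loop 2 cs = 4) ↔ cs = ['s', 'e'] := by
  cases cs with
  | nil => simp [a_re4_loop]
  | cons c rest =>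
    simp only [a_re4_loop]
    by_cases h : c = 's'
    · simp [h, loop3]
    · simp [h]

theorem loop1 (cs : List Char) : (a_re4_loop 1 cs = 4) ↔ cs = ['l', 's', 'e'] := by
  cases cs with
  | nil => simp [a_re4_loop]
  | cons c rest =>
    simp only [a_re4_loop]
    by_cases h : c = 'l'
    · simp [h, loop2]
    · simp [h]

theorem loop0 (cs : List Char) : (a_re4_loop 0 cs = 4) ↔ cs = ['e', 'l', 's', 'e'] := by
  cases cs with
  | nil => simp [a_re4_loop]
  | cons c rest =>
    simp only [a_re4_loop]
    by_cases h : c = 'e'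
    · simp [h, loop1]
    · simp [h]

-- ===== VERDICT (by name: the statement is the Claim_ definition above) =====
theorem a_re4_spec : Claim_equal_a_re4 := by
  intro word _
  unfold Spec_a_re4 a_re4 a_re4_alt
  by_cases h : a_re4_loop 0 word.toList = 4
  · simp [(loop0 word.toList).mp h, a_re4_loop]
  · have : word.toList ≠ ['e', 'l', 's', 'e'] := fun he => h ((loop0 word.toList).mpr he)
    simp [h, this]
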